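-- pv_equiv track=rewrite | github.com/Akmalbek09/semester_1 | Lesson_34/Lesson_34.py | word_sorter
-- ===== SOURCE A (Python) =====
-- def word_sorter(word):
--     my_list = []
--     word = list(word)
--     counter = 0
--     b = 0
--     z = ""
--     for x in word:
--         z = z + x
--         if x == '#':
--             my_list.append(z[1:len(z)-2])
--             b = counter+2
--             z = ""
--         counter +=1
--     return my_list
-- ===== SOURCE B (Python) =====
-- def word_sorter(word):
--     return [t[1:-1] for t in word.split('#')[:-1]]
-- ===== Notes on version B (the rewrite author's own statement) =====
-- stated objective: simpler
-- what changed: Replaced the character-by-character loop with accumulator string and counters by a single whole-token pass: split the string on the delimiter, drop the trailing unterminated piece, and strip the first and last character of each token.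
import Mathlib
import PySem

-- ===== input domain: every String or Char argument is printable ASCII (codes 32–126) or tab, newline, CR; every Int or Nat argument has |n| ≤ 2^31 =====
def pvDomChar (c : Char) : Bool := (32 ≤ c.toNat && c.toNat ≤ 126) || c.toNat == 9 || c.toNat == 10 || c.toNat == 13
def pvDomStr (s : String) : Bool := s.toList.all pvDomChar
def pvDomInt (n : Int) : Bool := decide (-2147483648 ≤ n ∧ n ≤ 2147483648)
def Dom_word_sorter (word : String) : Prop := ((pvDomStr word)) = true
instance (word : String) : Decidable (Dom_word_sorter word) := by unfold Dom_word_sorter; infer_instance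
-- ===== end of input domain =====

-- B: split on '#', drop the trailing unterminated piece, and strip first/last char of each
-- token — replacing A's character-by-character accumulator loop (objective: simpler).


-- ===== PORT A =====
-- loop state (my_list, counter, b, z); z kept as List Char (code points), exact on Dom
def wsStep (st : List String × Int × Int × List Char) (x : Char) :
    List String × Int × Int × List Char :=
  let ml := st.1; let counter := st.2.1; let b := st.2.2.1; let z := st.2.2.2
  let z := z ++ [x]
  if x = '#' then
    (ml ++ [String.ofList (PySem.Chars.slice z (some 1) (some ((z.length : Int) - 2)))],
     counter + 1, counter + 2, [])
  else (ml, counter + 1, b, z)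

def word_sorter (word : String) : List String :=
  (word.toList.foldl wsStep ([], 0, 0, [])).1

-- ===== PORT B =====
def word_sorter_alt (word : String) : List String :=
  (PySem.List.slice (PySem.Chars.splitOn word.toList ['#']) none (some (-1))).map
    (fun t => String.ofList (PySem.Chars.slice t (some 1) (some (-1))))

-- ===== PRECONDITION & SPEC =====
def Spec_word_sorter (word : String) (out : List String) : Prop := out = word_sorter_alt word
instance (word : String) (out : List String) : Decidable (Spec_word_sorter word out) := by unfold Spec_word_sorter; infer_instance

-- ===== CLAIM (what is proved, stated in full; the proofs are below) =====
def Claim_equal_word_sorter : Prop := ∀ (word : String), Dom_word_sorter word → Spec_word_sorter word (word_sorter word)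

-- ===== LEMMAS AND PROOFS =====

-- simple reference split on '#': saux l cur = remaining segments, cur = reversed current segment
def saux : List Char → List Char → List (List Char)
  | [], cur => [cur.reverse]
  | x :: rest, cur => if x = '#' then cur.reverse :: saux rest [] else saux rest (x :: cur)

theorem saux_ne_nil (l cur : List Char) : saux l cur ≠ [] := by
  induction l generalizing cur with
  | nil => simp [saux]
  | cons x rest ih =>
    simp only [saux]
    split_ifs <;> simp [ih]

theorem splitOn_go_hash (l : List Char) : ∀ (fuel : Nat) (cur : List Char)
    (acc : List (List Char)), l.length < fuel →
    PySem.Chars.splitOn.go ['#'] fuel l cur acc = acc.reverse ++ saux l cur := by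
  induction l with
  | nil =>
    intro fuel cur acc h
    match fuel with
    | fuel + 1 => simp [PySem.Chars.splitOn.go, saux]
  | cons x rest ih =>
    intro fuel cur acc h
    match fuel with
    | fuel + 1 =>
      by_cases hx : x = '#'
      · subst hx
        rw [show PySem.Chars.splitOn.go ['#'] (fuel+1) ('#'::rest) cur acc
              = PySem.Chars.splitOn.go ['#'] fuel rest [] (cur.reverse :: acc) by
            simp [PySem.Chars.splitOn.go, List.isPrefixOf]]
        rw [ih fuel [] (cur.reverse :: acc) (by simpa using Nat.lt_of_succ_lt_succ h)]
        simp [saux]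
      · have hpref : List.isPrefixOf ['#'] (x::rest) = false := by
          simp only [List.isPrefixOf, Bool.and_eq_false_iff, beq_eq_false_iff_ne]
          exact Or.inl (fun h => hx h.symm)
        rw [show PySem.Chars.splitOn.go ['#'] (fuel+1) (x::rest) cur acc
              = PySem.Chars.splitOn.go ['#'] fuel rest (x :: cur) acc by
            simp [PySem.Chars.splitOn.go, hpref]]
        rw [ih fuel (x :: cur) acc (by simpa using Nat.lt_of_succ_lt_succ h)]
        simp [saux, hx]

theorem splitOn_hash (cs : List Char) :
    PySem.Chars.splitOn cs ['#'] = saux cs [] := by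
  have := splitOn_go_hash cs (cs.length + 1) [] [] (Nat.lt_succ_self _)
  simpa [PySem.Chars.splitOn] using this

-- the two per-token slices agree: A slices segment++'#' by [1:len-2], B slices segment by [1:-1]
theorem slice_token (t : List Char) :
    PySem.Chars.slice (t ++ ['#']) (some 1) (some (((t ++ ['#']).length : Int) - 2))
      = PySem.Chars.slice t (some 1) (some (-1)) := by
  match t with
  | [] => decide
  | c :: rest =>
    have hL : ((((c :: rest) ++ ['#']).length : Int)) - 2 = ((rest.length : Nat) : Int) := by
      simp only [List.length_append, List.length_cons]
      push_cast; simp; ring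
    rw [PySem.Chars.slice_eq_listSlice, PySem.Chars.slice_eq_listSlice, hL,
      show (1:Int) = ((1:Nat):Int) from rfl, PySem.List.slice_natCast]
    simp only [PySem.List.slice, PySem.List.clampIdx, List.length_cons]
    norm_num
    rw [if_neg (not_lt.2 (Int.natCast_nonneg _)), List.take_append_of_le_length (by omega)]

def gTok (t : List Char) : String :=
  String.ofList (PySem.Chars.slice t (some 1) (some (-1)))

-- main loop invariant
theorem foldl_wsStep (cs : List Char) : ∀ (ml : List String) (c b : Int) (cur : List Char),
    (cs.foldl wsStep (ml, c, b, cur.reverse)).1 = ml ++ (saux cs cur).dropLast.map gTok := by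
  induction cs with
  | nil => intro ml c b cur; simp [saux]
  | cons x rest ih =>
    intro ml c b cur
    by_cases hx : x = '#'
    · subst hx
      have step : wsStep (ml, c, b, cur.reverse) '#'
          = (ml ++ [gTok cur.reverse], c + 1, c + 2, ([] : List Char)) := by
        simp only [wsStep, gTok]
        rw [slice_token cur.reverse]
        simp
      rw [List.foldl_cons, step,
        show ([] : List Char) = ([] : List Char).reverse from rfl, ih]
      have hne := saux_ne_nil rest []
      simp [saux, List.dropLast_cons_of_ne_nil hne]
    · have step : wsStep (ml, c, b, cur.reverse) x = (ml, c + 1, b, (x :: cur).reverse) := by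
        simp [wsStep, hx]
      rw [List.foldl_cons, step, ih]
      simp [saux, hx]

theorem slice_dropLast {α : Type} (l : List α) :
    PySem.List.slice l none (some (-1)) = l.dropLast := by
  simp only [PySem.List.slice, PySem.List.clampIdx]
  match l with
  | [] => rfl
  | a :: rest =>
    simp only [List.length_cons]
    rw [if_pos (by norm_num : (-1:Int) < 0),
      if_neg (show ¬(((rest.length + 1 : Nat) : Int) + (-1) < 0) by push_cast; omega)]
    have h : (((rest.length + 1 : Nat) : Int) + (-1)).toNat = rest.length := by push_cast; omega
    rw [h]
    simp [List.dropLast_eq_take]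

-- ===== VERDICT (by name: the statement is the Claim_ definition above) =====
theorem word_sorter_spec : Claim_equal_word_sorter := by
  intro word _
  show word_sorter word = word_sorter_alt word
  unfold word_sorter word_sorter_alt
  rw [splitOn_hash, slice_dropLast]
  have := foldl_wsStep word.toList [] 0 0 []
  simpa [gTok] using this
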